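-- pv_equiv track=rewrite | github.com/DavidZze/intent_classifier | intent_classifier/utils.py | get_intent_labels
-- ===== SOURCE A (Python) =====
-- from typing import Dict, Set
--
-- def get_intent_labels(intents) -> Dict[str, Set[str]]:
--     """
--     Disassemble intent labels in form of multi-levels to labels
--     with diferent levels.
--
--     Examples:
--         Intents:
--             [
--                 "news/sports_news/football",
--                 "news/sports_news/basketball",
--                 "news/sports_news/others",
--                 "news/tech_news",
--                 "news/social_news",
--                 "travel/culture",
--                 "travel/food",
--                 "shop/clothes",
--                 "chat/greeting",
--                 "chat/others",
--                 "confirm",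
--                 "unconfirm",
--                 "others"
--             ]
--
--         Disassembled class dict:
--             {
--                 "root": {"news", "travel", "shop", "chat", "confirm", "unconfirm", "others"},
--                 "news": {"news/sports_news", "news/tech_news", "news/social_news"},
--                 "news/sports_news": {"news/sports_news/football", "news/sports_news/basketball"},
--                 "travel": {"travel/culture", "travel/food"},
--                 "shop": {"shop/clothes"},
--                 "chat": {"chat/greeting", "chat/others"},
--             }
--
--     Parameters
--     ----------
--     intents: array-like intent strings
--
--     Returns
--     -------
--     Disassembled class list.
--
--     """
--     assert len(intents) > 0, "intents is empty!"
--
--     cls = {"root": set()}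
--     for intent in intents:
--         levels = intent.split("/")
--         name = levels[0]
--         cls["root"].add(name)
--         for level in levels[1:]:
--             if name not in cls:
--                 cls[name] = set()
--             new_name = name + "/" + level
--             cls[name].add(new_name)
--             name = new_name
--
--     return cls
-- ===== SOURCE B (Python) =====
-- def get_intent_labels(intents):
--     assert len(intents) > 0, "intents is empty!"
--     # Phase 1: collect every hierarchical prefix (= every tree node) of every intent.
--     all_prefixes = []
--     for intent in intents:
--         parts = intent.split("/")
--         acc = parts[0]
--         all_prefixes.append(acc)
--         for part in parts[1:]:
--             acc = acc + "/" + part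
--             all_prefixes.append(acc)
--     # Phase 2: derive each node's parent by reverse string split and group children under it.
--     cls = {"root": set()}
--     for p in dict.fromkeys(all_prefixes):
--         i = p.rfind("/")
--         parent = p[:i] if i >= 0 else "root"
--         cls.setdefault(parent, set()).add(p)
--     return cls
-- ===== Notes on version B (the rewrite author's own statement) =====
-- stated objective: alternative
-- what changed: Instead of interleaving dict-key creation and child insertion while threading the growing prefix through nested loops, B first collects the deduplicated list of all hierarchical prefixes (the tree's nodes) and then derives each node's parent by reverse string search (rfind + slice) to group children under it.
import Mathlib
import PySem

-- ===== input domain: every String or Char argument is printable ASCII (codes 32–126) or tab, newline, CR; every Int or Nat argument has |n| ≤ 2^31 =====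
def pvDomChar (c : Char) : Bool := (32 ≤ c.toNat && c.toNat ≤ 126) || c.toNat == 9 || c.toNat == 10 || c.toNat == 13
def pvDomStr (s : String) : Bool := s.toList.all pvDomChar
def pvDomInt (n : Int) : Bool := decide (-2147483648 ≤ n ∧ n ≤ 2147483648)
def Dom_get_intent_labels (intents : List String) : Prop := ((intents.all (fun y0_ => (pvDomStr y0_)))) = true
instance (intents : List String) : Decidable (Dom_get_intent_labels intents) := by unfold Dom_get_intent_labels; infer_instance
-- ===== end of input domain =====

-- B replaces A's interleaved dict-building by two phases: collect all hierarchical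
-- prefixes (nodes) first, then derive each node's parent by reverse string search
-- (rfind + slice) over the deduplicated node list (objective: alternative).

-- ===== PORT A =====
-- levels[0] is ported as headD "" (split on a non-empty separator never returns []);
-- cls["root"].add / cls[name].add are ported with Dict.modify (the key is always present there,
-- so the modify default is never used); the assert is Pre_get_intent_labels.
def get_intent_labels (intents : List String) : List (String × List String) :=
  let cls0 : PySem.Dict String (PySem.Set String) :=
    PySem.Dict.empty.insert "root" PySem.Set.empty
  let cls := intents.foldl (fun cls intent =>
    let levels := (PySem.Str.split? intent "/").getD []   -- sep ≠ "" so split? is some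
    let name := levels.headD ""
    let cls := cls.modify "root" PySem.Set.empty (fun s => s.add name)
    let st := (PySem.List.slice levels (some 1) none).foldl
      (fun (st : PySem.Dict String (PySem.Set String) × String) level =>
        let cls := st.1
        let name := st.2
        let cls := if cls.contains name then cls else cls.insert name PySem.Set.empty
        let new_name := name ++ "/" ++ level
        let cls := cls.modify name PySem.Set.empty (fun s => s.add new_name)
        (cls, new_name)) (cls, name)
    st.1) cls0
  cls.items

-- ===== PORT B =====
-- dict.fromkeys-as-ordered-dedup is PySem.List.dedup; the assert is Pre_get_intent_labels.
def get_intent_labels_alt (intents : List String) : List (String × List String) :=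
  let all_prefixes : List String := intents.foldl (fun aps intent =>
    let parts := (PySem.Str.split? intent "/").getD []    -- sep ≠ "" so split? is some
    let acc := parts.headD ""
    let st := (PySem.List.slice parts (some 1) none).foldl
      (fun (st : List String × String) part =>
        let acc := st.2 ++ "/" ++ part
        (st.1 ++ [acc], acc)) (aps ++ [acc], acc)
    st.1) []
  let cls := (PySem.List.dedup all_prefixes).foldl
    (fun cls p =>
      let i := PySem.Str.rfind p "/"
      let parent := if 0 ≤ i then PySem.Str.slice p none (some i) else "root"
      (cls.setdefault parent PySem.Set.empty).modify parent PySem.Set.empty (fun s => s.add p))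
    (PySem.Dict.empty.insert "root" PySem.Set.empty)
  cls.items

-- ===== PRECONDITION & SPEC =====
-- Pre_ excludes only the empty list, on which Python A raises AssertionError ("intents is empty!").
def Pre_get_intent_labels (intents : List String) : Prop := intents ≠ []
instance (intents : List String) : Decidable (Pre_get_intent_labels intents) := by
  unfold Pre_get_intent_labels; infer_instance
def pvWitness_get_intent_labels : List String := ["news/sports_news/football", "news/tech_news", "chat"]

def Spec_get_intent_labels (intents : List String) (out : List (String × List String)) : Prop :=
  out = get_intent_labels_alt intents
instance (intents : List String) (out : List (String × List String)) :
    Decidable (Spec_get_intent_labels intents out) := by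
  unfold Spec_get_intent_labels; infer_instance

-- ===== CLAIM (what is proved, stated in full; the proofs are below) =====
def Claim_equal_get_intent_labels : Prop :=
  ∀ (intents : List String), Dom_get_intent_labels intents → Pre_get_intent_labels intents →
    Spec_get_intent_labels intents (get_intent_labels intents)

-- ===== LEMMAS AND PROOFS =====
theorem pv_not_prefix_drop {s : List Char} {d : Char} (h : d ∉ s) (j : ℕ) :
    List.isPrefixOf [d] (List.drop j s) = false := by
  rw [Bool.eq_false_iff]
  intro hp
  have hp' := List.isPrefixOf_iff_prefix.mp hp
  have : d ∈ List.drop j s := hp'.mem (by simp)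
  exact h (List.mem_of_mem_drop this)

theorem pv_rfind_go_neg {s : List Char} {d : Char} (h : d ∉ s) :
    ∀ k, PySem.Chars.rfind.go s [d] k = -1 := by
  intro k
  induction k with
  | zero =>
      rw [PySem.Chars.rfind.go]
      simp [show List.isPrefixOf [d] s = false from by simpa using pv_not_prefix_drop h 0]
  | succ j ih =>
      rw [PySem.Chars.rfind.go]
      simp [pv_not_prefix_drop h (j+1), ih]

theorem pv_rfind_neg {s : List Char} {d : Char} (h : d ∉ s) :
    PySem.Chars.rfind s [d] = -1 := by
  rw [PySem.Chars.rfind]; exact pv_rfind_go_neg h _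

theorem pv_rfind_go_append (as bs : List Char) (d : Char) (h : d ∉ bs) :
    ∀ k, as.length ≤ k → k ≤ (as ++ d :: bs).length →
      PySem.Chars.rfind.go (as ++ d :: bs) [d] k = (as.length : Int) := by
  intro k
  induction k with
  | zero =>
      intro h1 _
      have : as = [] := List.eq_nil_of_length_eq_zero (by omega)
      subst this
      rw [PySem.Chars.rfind.go]
      simp [List.isPrefixOf]
  | succ j ih =>
      intro h1 h2
      rw [PySem.Chars.rfind.go]
      by_cases hj : j + 1 = as.length
      · have : List.drop (j+1) (as ++ d :: bs) = d :: bs := by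
          rw [hj, List.drop_append_of_le_length (by omega)]  -- guess name
          simp
        rw [this]
        simp [List.isPrefixOf, hj]
      · -- j + 1 > as.length
        have hgt : as.length < j + 1 := by omega
        have hdrop : List.drop (j+1) (as ++ d :: bs) = List.drop (j - as.length) bs := by
          rw [List.drop_append, List.drop_of_length_le (by omega)]
          have : j + 1 - as.length = (j - as.length) + 1 := by omega
          rw [this, List.drop_succ_cons]
          simp
        have hpf : List.isPrefixOf [d] (List.drop (j+1) (as ++ d :: bs)) = false := by
          rw [hdrop]; exact pv_not_prefix_drop h _
        rw [hpf]
        simp only [Bool.false_eq_true, if_false]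
        exact ih (by omega) (by omega)

theorem pv_rfind_append (as bs : List Char) (d : Char) (h : d ∉ bs) :
    PySem.Chars.rfind (as ++ d :: bs) [d] = (as.length : Int) := by
  rw [PySem.Chars.rfind]
  exact pv_rfind_go_append as bs d h _ (by simp) (by omega)

theorem pv_go_cons (d c : Char) (f : ℕ) (rest cur : List Char) (acc : List (List Char)) :
    PySem.Chars.splitOn.go [d] (f+1) (c :: rest) cur acc =
      (if List.isPrefixOf [d] (c :: rest) then
        PySem.Chars.splitOn.go [d] f rest [] (cur.reverse :: acc)
       else PySem.Chars.splitOn.go [d] f rest (c :: cur) acc) := by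
  rw [PySem.Chars.splitOn.go]
  simp

theorem pv_go_nil (d : Char) (f : ℕ) (cur : List Char) (acc : List (List Char)) :
    PySem.Chars.splitOn.go [d] (f+1) [] cur acc = (cur.reverse :: acc).reverse := by
  rw [PySem.Chars.splitOn.go]
  omega

theorem pv_splitOn_go_sepfree (d : Char) :
    ∀ fuel (l cur : List Char) (acc : List (List Char)), l.length < fuel → d ∉ cur →
      (∀ p ∈ acc, d ∉ p) → ∀ p ∈ PySem.Chars.splitOn.go [d] fuel l cur acc, d ∉ p := by
  intro fuel
  induction fuel with
  | zero => intro l cur acc h1; omega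
  | succ f ih =>
      intro l cur acc h1 h2 h3 p hp
      match l with
      | [] =>
          rw [pv_go_nil] at hp
          simp at hp
          rcases hp with hp | hp
          · exact h3 p hp
          · subst hp; simpa using h2
      | c :: rest =>
          rw [pv_go_cons] at hp
          by_cases hc : c = d
          · rw [if_pos (by simp [List.isPrefixOf, hc])] at hp
            refine ih rest [] (cur.reverse :: acc) (by simpa using h1) (by simp) ?_ p hp
            intro q hq
            rcases List.mem_cons.mp hq with hq | hq
            · subst hq; simpa using h2
            · exact h3 q hq
          · rw [if_neg (by simp [List.isPrefixOf]; exact fun hdc => hc hdc.symm)] at hp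
            refine ih rest (c :: cur) acc (by simpa using h1) ?_ h3 p hp
            simp [h2]
            exact fun hdc => hc hdc.symm

theorem pv_pieces_sepfree (s : String) :
    ∀ p ∈ (PySem.Str.split? s "/").getD [], '/' ∉ p.toList := by
  intro p hp
  rw [PySem.Str.split?] at hp
  rw [PySem.Chars.split?] at hp
  simp at hp
  obtain ⟨cs, hcs, rfl⟩ := hp
  rw [String.toList_ofList]
  rw [PySem.Chars.splitOn] at hcs
  exact pv_splitOn_go_sepfree '/' _ _ _ _ (by omega) (by simp) (by simp) cs hcs

def pvParent (p : String) : String :=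
  if 0 ≤ PySem.Str.rfind p "/" then PySem.Str.slice p none (some (PySem.Str.rfind p "/")) else "root"

theorem pv_parent_top {t : String} (h : '/' ∉ t.toList) : pvParent t = "root" := by
  unfold pvParent
  rw [PySem.Str.rfind]
  have : ("/" : String).toList = ['/'] := rfl
  rw [this, pv_rfind_neg h]
  norm_num

theorem pv_toList_concat (name level : String) :
    (name ++ "/" ++ level).toList = name.toList ++ '/' :: level.toList := by
  rw [String.toList_append, String.toList_append]
  simp

theorem pv_parent_concat (name level : String) (h : '/' ∉ level.toList) :
    pvParent (name ++ "/" ++ level) = name := by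
  unfold pvParent
  rw [PySem.Str.rfind]
  have hsep : ("/" : String).toList = ['/'] := rfl
  rw [hsep, pv_toList_concat, pv_rfind_append _ _ _ h]
  rw [if_pos (by positivity)]
  apply String.ext
  rw [PySem.Str.slice]
  rw [String.toList_ofList]
  simp only [PySem.Chars.slice_eq_listSlice]
  rw [pv_toList_concat, PySem.List.slice_to_natCast]
  exact List.take_left

abbrev pvIDict : Type := PySem.Dict String (PySem.Set String)

def pvAdd (cls : pvIDict) (p : String) : pvIDict :=
  (PySem.Dict.setdefault cls (pvParent p) PySem.Set.empty).modify (pvParent p) PySem.Set.empty (fun s => s.add p)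

def pvInv (cls : pvIDict) : Prop :=
  (PySem.Dict.keys cls).Nodup ∧ PySem.Dict.contains cls "root" = true

def pvRec (cls : pvIDict) (p : String) : Prop :=
  ∃ s, PySem.Dict.get? cls (pvParent p) = some s ∧ p ∈ s

theorem pv_inv_pvAdd {cls : pvIDict} (h : pvInv cls) (p : String) : pvInv (pvAdd cls p) := by
  obtain ⟨hn, hr⟩ := h
  unfold pvAdd PySem.Dict.modify
  constructor
  · apply PySem.Dict.nodup_keys_insert
    rw [PySem.Dict.keys_setdefault]
    split_ifs with hc
    · exact hn
    · rw [List.nodup_append]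
      refine ⟨hn, by simp, ?_⟩
      intro a ha b hb hab
      simp at hb
      subst hb
      subst hab
      exact hc ((PySem.Dict.contains_iff_mem_keys _ _).mpr ha)
  · rw [PySem.Dict.contains_insert, PySem.Dict.contains_setdefault, hr]
    simp

theorem pv_rec_self (cls : pvIDict) (p : String) : pvRec (pvAdd cls p) p := by
  unfold pvAdd PySem.Dict.modify pvRec
  refine ⟨_, PySem.Dict.get?_insert_self _ _ _, ?_⟩
  rw [PySem.Set.mem_add]
  right; rfl

theorem pv_rec_mono {cls : pvIDict} {p : String} (h : pvRec cls p) (q : String) :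
    pvRec (pvAdd cls q) p := by
  obtain ⟨s, hs, hm⟩ := h
  unfold pvAdd PySem.Dict.modify
  by_cases he : pvParent p = pvParent q
  · refine ⟨_, by rw [he, PySem.Dict.get?_insert_self], ?_⟩
    rw [PySem.Dict.getD_setdefault_self, PySem.Dict.getD_eq_get?_getD, ← he, hs]
    rw [PySem.Set.mem_add]
    exact Or.inl hm
  · refine ⟨s, ?_, hm⟩
    rw [PySem.Dict.get?_insert, if_neg he, PySem.Dict.get?_setdefault_of_ne _ _ he]
    exact hs

theorem pv_map_if_eq :
    ∀ (l : List (String × PySem.Set String)) (k : String) (v : PySem.Set String),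
      (l.map Prod.fst).Nodup →
      Option.map Prod.snd (l.find? (fun p => p.1 == k)) = some v →
      l.map (fun p => if (p.1 == k) = true then (k, v) else p) = l := by
  intro l
  induction l with
  | nil => intro k v _ h; simp at h
  | cons a l ih =>
      intro k v hn h
      by_cases hk : a.1 = k
      · rw [List.find?_cons_of_pos (by simp [hk])] at h
        simp at h
        have hid : l.map (fun p => if (p.1 == k) = true then (k, v) else p) = l := by
          rw [show l.map (fun p => if (p.1 == k) = true then (k, v) else p) = l.map id from ?_, List.map_id]
          apply List.map_congr_left
          intro b hb
          have hbk : b.1 ≠ k := by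
            intro hbk
            have hn' : (a.1 :: l.map Prod.fst).Nodup := by rw [← List.map_cons]; exact hn
            exact (List.nodup_cons.mp hn').1 (List.mem_map.mpr ⟨b, hb, hbk.trans hk.symm⟩)
          simp [hbk]
        rw [List.map_cons, if_pos (by simp [hk]), hid]
        congr 1
        rw [← hk, ← h]
      · rw [List.find?_cons_of_neg (by simp [hk])] at h
        simp at hn
        rw [List.map_cons, ih k v hn.2 h]
        simp [hk]

theorem pv_insert_same (d : pvIDict) (k : String) (v : PySem.Set String)
    (hn : (PySem.Dict.keys d).Nodup) (h : PySem.Dict.get? d k = some v) :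
    PySem.Dict.insert d k v = d := by
  have hc : PySem.Dict.contains d k = true := by
    rw [PySem.Dict.contains_eq_isSome_get?, h]; rfl
  cases d with
  | mk items =>
    rw [PySem.Dict.insert, if_pos hc]
    congr 1
    exact pv_map_if_eq items k v hn h

theorem pv_pvAdd_of_rec {cls : pvIDict} {p : String} (hI : pvInv cls) (h : pvRec cls p) :
    pvAdd cls p = cls := by
  obtain ⟨s, hs, hm⟩ := h
  have hc : PySem.Dict.contains cls (pvParent p) = true := by
    rw [PySem.Dict.contains_eq_isSome_get?, hs]; rfl
  unfold pvAdd
  rw [PySem.Dict.setdefault_of_contains _ _ hc]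
  rw [PySem.Dict.modify]
  rw [PySem.Dict.getD_eq_get?_getD, hs]
  have : PySem.Set.add s p = s := by
    rw [PySem.Set.add, if_pos ((PySem.Set.contains_iff s p).mpr hm)]
  rw [Option.getD_some, this]
  exact pv_insert_same _ _ _ hI.1 hs

theorem pv_inv_fold :
    ∀ (xs : List String) {cls : pvIDict}, pvInv cls → pvInv (xs.foldl pvAdd cls) := by
  intro xs
  induction xs with
  | nil => intro cls h; exact h
  | cons x xs ih => intro cls h; exact ih (pv_inv_pvAdd h x)

theorem pv_fold_skip :
    ∀ (ys : List String) (cls : pvIDict) (t : String), pvInv cls → pvRec cls t →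
      ys.foldl pvAdd cls = (ys.filter (fun y => !(y == t))).foldl pvAdd cls := by
  intro ys
  induction ys with
  | nil => intro cls t _ _; rfl
  | cons y ys ih =>
      intro cls t hI hR
      by_cases hy : y = t
      · subst hy
        rw [List.filter_cons_of_neg (by simp)]
        rw [List.foldl_cons, pv_pvAdd_of_rec hI hR]
        exact ih cls y hI hR
      · rw [List.filter_cons_of_pos (by simp [hy])]
        rw [List.foldl_cons, List.foldl_cons]
        exact ih (pvAdd cls y) t (pv_inv_pvAdd hI y) (pv_rec_mono hR y)

theorem pv_fold_dedup :
    ∀ (xs : List String) (cls : pvIDict), pvInv cls →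
      xs.foldl pvAdd cls = (PySem.Set.ofList xs).foldl pvAdd cls := by
  intro xs
  induction xs with
  | nil => intro cls _; rfl
  | cons x xs ih =>
      intro cls hI
      rw [PySem.Set.ofList_cons, List.foldl_cons, List.foldl_cons]
      rw [ih (pvAdd cls x) (pv_inv_pvAdd hI x)]
      rw [PySem.Set.discard]
      exact pv_fold_skip (PySem.Set.ofList xs) (pvAdd cls x) x
        (pv_inv_pvAdd hI x) (pv_rec_self cls x)

def pvCumulTail (name : String) : List String → List String
  | [] => []
  | l :: ls => (name ++ "/" ++ l) :: pvCumulTail (name ++ "/" ++ l) ls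

def pvToks (intent : String) : List String :=
  let parts := (PySem.Str.split? intent "/").getD []
  parts.headD "" :: pvCumulTail (parts.headD "") parts.tail

def pvAInner (st : pvIDict × String) (level : String) : pvIDict × String :=
  let cls := st.1
  let name := st.2
  let cls := if PySem.Dict.contains cls name then cls else PySem.Dict.insert cls name PySem.Set.empty
  let new_name := name ++ "/" ++ level
  let cls := PySem.Dict.modify cls name PySem.Set.empty (fun s => s.add new_name)
  (cls, new_name)

def pvABody (cls : pvIDict) (intent : String) : pvIDict :=
  let levels := (PySem.Str.split? intent "/").getD []
  let name := levels.headD ""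
  let cls := PySem.Dict.modify cls "root" PySem.Set.empty (fun s => s.add name)
  ((PySem.List.slice levels (some 1) none).foldl pvAInner (cls, name)).1

def pvBInner (st : List String × String) (part : String) : List String × String :=
  let acc := st.2 ++ "/" ++ part
  (st.1 ++ [acc], acc)

def pvBBody (aps : List String) (intent : String) : List String :=
  let parts := (PySem.Str.split? intent "/").getD []
  let acc := parts.headD ""
  ((PySem.List.slice parts (some 1) none).foldl pvBInner (aps ++ [acc], acc)).1

theorem pv_AInner_step (cls : pvIDict) (name level : String) (h : '/' ∉ level.toList) :
    pvAInner (cls, name) level = (pvAdd cls (name ++ "/" ++ level), name ++ "/" ++ level) := by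
  unfold pvAInner pvAdd
  simp only []
  rw [pv_parent_concat name level h]
  congr 2
  rw [PySem.Dict.setdefault, PySem.Dict.insert]
  split_ifs <;> rfl

theorem pv_A_inner :
    ∀ (rest : List String) (name : String) (cls : pvIDict),
      (∀ l ∈ rest, '/' ∉ l.toList) →
      (rest.foldl pvAInner (cls, name)).1 = (pvCumulTail name rest).foldl pvAdd cls := by
  intro rest
  induction rest with
  | nil => intro name cls _; rfl
  | cons l ls ih =>
      intro name cls hf
      rw [List.foldl_cons, pv_AInner_step cls name l (hf l (by simp)), pvCumulTail,
        List.foldl_cons]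
      exact ih _ _ (fun x hx => hf x (by simp [hx]))

theorem pv_headD_sepfree (parts : List String) (h : ∀ p ∈ parts, '/' ∉ p.toList) :
    '/' ∉ (parts.headD "").toList := by
  cases parts with
  | nil => simp
  | cons a l => exact h a (by simp)

theorem pv_A_intent (intent : String) (cls : pvIDict)
    (hroot : PySem.Dict.contains cls "root" = true) :
    pvABody cls intent = (pvToks intent).foldl pvAdd cls := by
  unfold pvABody pvToks
  simp only [PySem.List.slice_from_one]
  have hf := pv_pieces_sepfree intent
  rw [List.foldl_cons]
  rw [pv_A_inner _ _ _ (fun x hx => hf x (List.mem_of_mem_tail hx))]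
  congr 1
  unfold pvAdd
  rw [pv_parent_top (pv_headD_sepfree _ hf)]
  rw [PySem.Dict.setdefault_of_contains _ _ hroot]

theorem pv_A_fold :
    ∀ (xs : List String) (cls : pvIDict), pvInv cls →
      xs.foldl pvABody cls = (xs.flatMap pvToks).foldl pvAdd cls := by
  intro xs
  induction xs with
  | nil => intro cls _; rfl
  | cons x xs ih =>
      intro cls hI
      rw [List.foldl_cons, List.flatMap_cons, List.foldl_append]
      rw [pv_A_intent x cls hI.2]
      exact ih _ (pv_inv_fold _ hI)

theorem pv_B_inner :
    ∀ (rest : List String) (name : String) (aps : List String),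
      (rest.foldl pvBInner (aps ++ [name], name)).1 = aps ++ name :: pvCumulTail name rest := by
  intro rest
  induction rest with
  | nil => intro name aps; simp [pvCumulTail]
  | cons l ls ih =>
      intro name aps
      rw [List.foldl_cons]
      show (ls.foldl pvBInner ((aps ++ [name]) ++ [name ++ "/" ++ l], name ++ "/" ++ l)).1 = _
      rw [ih (name ++ "/" ++ l) (aps ++ [name]), pvCumulTail]
      simp

theorem pv_B_fold :
    ∀ (xs : List String) (aps : List String),
      xs.foldl pvBBody aps = aps ++ xs.flatMap pvToks := by
  intro xs
  induction xs with
  | nil => intro aps; simp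
  | cons x xs ih =>
      intro aps
      rw [List.foldl_cons, ih, List.flatMap_cons]
      have : pvBBody aps x = aps ++ pvToks x := by
        unfold pvBBody pvToks
        simp only [PySem.List.slice_from_one]
        exact pv_B_inner _ _ _
      rw [this]
      simp

def pvCls0 : pvIDict := PySem.Dict.insert PySem.Dict.empty "root" PySem.Set.empty

theorem pv_inv_cls0 : pvInv pvCls0 := by
  constructor
  · simp [pvCls0, PySem.Dict.insert, PySem.Dict.keys, PySem.Dict.empty, PySem.Dict.contains]
  · simp [pvCls0, PySem.Dict.insert, PySem.Dict.empty, PySem.Dict.contains]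

-- the ports in terms of the named bodies
theorem pvA_eq (intents : List String) :
    get_intent_labels intents = PySem.Dict.items (intents.foldl pvABody pvCls0) := rfl

theorem pvB_eq (intents : List String) :
    get_intent_labels_alt intents
      = PySem.Dict.items ((PySem.List.dedup (intents.foldl pvBBody [])).foldl pvAdd pvCls0) := rfl

-- ===== VERDICT (by name: the statement is the Claim_ definition above) =====
theorem get_intent_labels_spec : Claim_equal_get_intent_labels := by
  intro intents _ _
  unfold Spec_get_intent_labels
  rw [pvA_eq, pvB_eq, pv_B_fold, List.nil_append, PySem.List.dedup_eq_ofList,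
      pv_A_fold intents pvCls0 pv_inv_cls0, pv_fold_dedup _ _ pv_inv_cls0]
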